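-- pv_equiv track=rewrite | github.com/eliottcassidy2000/math | 04-computation/n5_P_polynomial.py | count_5cycles
-- ===== SOURCE A (Python) =====
-- from itertools import permutations, combinations
--
-- def count_5cycles(adj, n=5):
--     """Count directed 5-cycles (Hamiltonian cycles)."""
--     count = 0
--     # Fix vertex 0 to avoid counting rotations
--     for perm in permutations(range(1, 5)):
--         cycle = [0] + list(perm)
--         is_cycle = True
--         for idx in range(5):
--             if not adj[cycle[idx]][cycle[(idx+1)%5]]:
--                 is_cycle = False
--                 break
--         if is_cycle:
--             count += 1
--     # Each undirected cycle counted twice (two directions), each directed once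
--     # With vertex 0 fixed, we get each directed cycle exactly once
--     return count
-- ===== SOURCE B (Python) =====
-- def count_5cycles(adj, n=5):
--     """Count directed Hamiltonian 5-cycles by DFS backtracking rooted at vertex 0."""
--     def dfs(cur, visited):
--         if len(visited) == 5:
--             return 1 if adj[cur][0] else 0
--         total = 0
--         for v in range(1, 5):
--             if v not in visited and adj[cur][v]:
--                 total += dfs(v, visited + [v])
--         return total
--     return dfs(0, [0])
-- ===== Notes on version B (the rewrite author's own statement) =====
-- stated objective: alternative
-- what changed: Replaces the enumeration of all 24 permutations of {1,2,3,4} with a recursive DFS/backtracking search rooted at vertex 0 that extends a path only along present edges and prunes dead branches early.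
-- outside the precondition, e.g. on count_5cycles([[0, 0, 0, 0, 0]], 5): A returns 0, B returns 0
import Mathlib
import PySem

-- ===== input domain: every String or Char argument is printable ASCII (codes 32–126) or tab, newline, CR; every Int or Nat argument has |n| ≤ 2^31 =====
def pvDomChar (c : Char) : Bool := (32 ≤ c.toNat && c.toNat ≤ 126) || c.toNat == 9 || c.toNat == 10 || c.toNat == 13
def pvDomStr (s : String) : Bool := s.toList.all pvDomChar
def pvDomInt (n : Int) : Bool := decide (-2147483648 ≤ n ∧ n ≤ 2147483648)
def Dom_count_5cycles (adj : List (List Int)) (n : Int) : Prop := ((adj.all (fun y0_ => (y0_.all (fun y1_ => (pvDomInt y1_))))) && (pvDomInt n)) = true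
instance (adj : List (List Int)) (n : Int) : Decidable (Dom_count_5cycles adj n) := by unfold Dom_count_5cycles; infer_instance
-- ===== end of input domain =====

-- B replaces A's 24-permutation enumeration by a DFS/backtracking search rooted at vertex 0 (alternative decomposition, same exact count).


-- ===== PORT A =====
-- adj[i][j]: Pre_ guarantees both indices are in range, so the getD defaults are never reached on admitted inputs.
def pvEntry (adj : List (List Int)) (i j : Int) : Int :=
  PySem.List.pyGetD (PySem.List.pyGetD adj i []) j 0

-- Python truthiness of an int entry: nonzero.
def pvEdge (adj : List (List Int)) (i j : Int) : Bool :=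
  pvEntry adj i j != 0

-- itertools.permutations(xs) in its order: pick each element in list order, recurse on the rest.
def pvPerms : Nat → List Int → List (List Int)
  | 0, _ => [[]]
  | m + 1, xs => xs.flatMap (fun v => (pvPerms m (xs.erase v)).map (v :: ·))

-- A's inner 'for idx in range(5)' with the break: checks edges from position idx on.
def pvCheckA (adj : List (List Int)) (cycle : List Int) (idx : Nat) : Bool :=
  if idx < 5 then
    if pvEdge adj (cycle.getD idx 0) (cycle.getD ((idx + 1) % 5) 0) then
      pvCheckA adj cycle (idx + 1)
    else false
  else true
termination_by 5 - idx
decreasing_by omega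

def count_5cycles (adj : List (List Int)) (n : Int) : Int :=
  (pvPerms 4 (PySem.List.pyRange 1 5 1)).foldl
    (fun count perm => if pvCheckA adj (0 :: perm) 0 then count + 1 else count) 0

-- ===== PORT B =====
-- B's recursive dfs(cur, visited); fuel is the recursion depth bound (5 suffices, never exhausted).
def pvDfs (adj : List (List Int)) (cur : Int) (visited : List Int) : Nat → Int
  | 0 => 0
  | fuel + 1 =>
    if visited.length = 5 then (if pvEdge adj cur 0 then 1 else 0)
    else
      (PySem.List.pyRange 1 5 1).foldl
        (fun total v =>
          if v ∉ visited ∧ pvEdge adj cur v = true then total + pvDfs adj v (visited ++ [v]) fuel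
          else total) 0

def count_5cycles_alt (adj : List (List Int)) (n : Int) : Int :=
  pvDfs adj 0 [0] 5

-- ===== PRECONDITION & SPEC =====
-- Pre_ restricts to the natural domain, an adjacency matrix with at least 5 rows of at least 5 columns:
-- on smaller inputs A raises IndexError, except when an earlier missing edge short-circuits the scan
-- (e.g. adj = [[0,0,0,0,0]], where both A and B return 0).
def Pre_count_5cycles (adj : List (List Int)) (n : Int) : Prop :=
  5 ≤ adj.length ∧ ∀ row ∈ adj.take 5, 5 ≤ row.length
instance (adj : List (List Int)) (n : Int) : Decidable (Pre_count_5cycles adj n) := by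
  unfold Pre_count_5cycles; infer_instance

def pvWitness_count_5cycles : List (List Int) × Int :=
  ([[0,1,0,0,0],[0,0,1,0,0],[0,0,0,1,0],[0,0,0,0,1],[1,0,0,0,0]], 5)

def Spec_count_5cycles (adj : List (List Int)) (n : Int) (out : Int) : Prop := out = count_5cycles_alt adj n
instance (adj : List (List Int)) (n : Int) (out : Int) : Decidable (Spec_count_5cycles adj n out) := by unfold Spec_count_5cycles; infer_instance

-- ===== CLAIM (what is proved, stated in full; the proofs are below) =====
def Claim_equal_count_5cycles : Prop := ∀ (adj : List (List Int)) (n : Int), Dom_count_5cycles adj n → Pre_count_5cycles adj n → Spec_count_5cycles adj n (count_5cycles adj n)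

-- ===== LEMMAS AND PROOFS =====

-- Boolean chain: edges c → p0 → p1 → … → last → 0.
def pvChain (adj : List (List Int)) (c : Int) : List Int → Bool
  | [] => pvEdge adj c 0
  | v :: t => pvEdge adj c v && pvChain adj v t

-- The common normal form: number of lists in l whose chain from c closes.
def pvCnt (adj : List (List Int)) (c : Int) (l : List (List Int))  : Int :=
  (l.map (fun p => if pvChain adj c p then (1 : Int) else 0)).sum

theorem pvPerms_length_mem : ∀ (m : Nat) (xs : List Int) (p : List Int),
    p ∈ pvPerms m xs → p.length = m := by
  intro m
  induction m with
  | zero => intro xs p hp; simp [pvPerms] at hp; simp [hp]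
  | succ m ih =>
    intro xs p hp
    simp only [pvPerms, List.mem_flatMap, List.mem_map] at hp
    obtain ⟨v, _, q, hq, rfl⟩ := hp
    simp [ih _ _ hq]

theorem pvFoldl_if_add (l : List Int) (P : Int → Prop) [DecidablePred P]
    (X : Int → Int) (a : Int) :
    l.foldl (fun acc v => if P v then acc + X v else acc) a
      = a + (l.map (fun v => if P v then X v else 0)).sum := by
  induction l generalizing a with
  | nil => simp
  | cons x t ih => by_cases h : P x <;> simp [h, ih] <;> ring

theorem pvSum_if_and (l : List Int) (a : Int → Prop) [DecidablePred a]
    (b : Int → Prop) [∀ v, Decidable (b v)] (X : Int → Int) :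
    (l.map (fun v => if a v ∧ b v then X v else 0)).sum
      = ((l.filter (fun v => decide (a v))).map (fun v => if b v then X v else 0)).sum := by
  induction l with
  | nil => simp
  | cons x t ih =>
    by_cases ha : a x
    · by_cases hb : b x <;> simp [ha, hb, ih]
    · simp [ha, ih]

theorem pvCnt_flatMap (adj : List (List Int)) (c : Int) (l : List Int)
    (g : Int → List (List Int)) :
    pvCnt adj c (l.flatMap g) = (l.map (fun v => pvCnt adj c (g v))).sum := by
  induction l with
  | nil => simp [pvCnt]
  | cons x t ih => simp [pvCnt, List.flatMap_cons, List.map_append, List.sum_append] at *; simp [ih]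

theorem pvCnt_map_cons (adj : List (List Int)) (c v : Int) (ps : List (List Int)) :
    pvCnt adj c (ps.map (v :: ·))
      = if pvEdge adj c v = true then pvCnt adj v ps else 0 := by
  by_cases h : pvEdge adj c v = true
  · simp [pvCnt, List.map_map, Function.comp_def, pvChain, h]
  · rw [Bool.not_eq_true] at h
    simp [pvCnt, List.map_map, Function.comp_def, pvChain, h]

-- Main invariant of the DFS: with 'rest' the still-unvisited vertices of range(1,5), the dfs value
-- is the number of chains over the permutations of rest.
theorem pvDfs_eq_cnt : ∀ (fuel : Nat) (adj : List (List Int)) (c : Int) (visited rest : List Int),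
    rest = (PySem.List.pyRange 1 5 1).filter (fun v => decide (v ∉ visited)) →
    rest.length = fuel → visited.length + fuel = 5 →
    pvDfs adj c visited (fuel + 1) = pvCnt adj c (pvPerms fuel rest) := by
  intro fuel
  induction fuel with
  | zero =>
    intro adj c visited rest _ _ hv
    simp only [Nat.add_zero] at hv
    simp [pvDfs, hv, pvPerms, pvCnt, pvChain]
  | succ fuel ih =>
    intro adj c visited rest hrest hlen hv
    have hne : visited.length ≠ 5 := by omega
    have hnodup : rest.Nodup := by
      rw [hrest]; exact (PySem.List.nodup_pyRange_one 1 5).filter _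
    rw [pvDfs, if_neg hne,
        pvFoldl_if_add (PySem.List.pyRange 1 5 1)
          (fun v => v ∉ visited ∧ pvEdge adj c v = true)
          (fun v => pvDfs adj v (visited ++ [v]) (fuel + 1)) 0,
        pvSum_if_and (PySem.List.pyRange 1 5 1) (fun v => v ∉ visited)
          (fun v => pvEdge adj c v = true) _,
        ← hrest]
    rw [show pvPerms (fuel + 1) rest
          = rest.flatMap (fun v => (pvPerms fuel (rest.erase v)).map (v :: ·)) from rfl,
        pvCnt_flatMap]
    rw [zero_add]
    congr 1
    apply List.map_congr_left
    intro v hvrest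
    rw [pvCnt_map_cons]
    by_cases he : pvEdge adj c v = true
    · rw [if_pos he, if_pos he]
      apply ih
      · rw [hrest]
        rw [List.Nodup.erase_eq_filter (hrest ▸ hnodup) v, List.filter_filter]
        apply List.filter_congr
        intro x _
        by_cases hxv : x = v
        · subst hxv; simp
        · simp [hxv]
      · have := List.length_erase_of_mem hvrest
        omega
      · simp; omega
    · rw [if_neg he, if_neg he]
-- A's check on [0]++perm equals the chain from 0 through perm, for 4-element perms.
theorem pvCheckA_eq_chain (adj : List (List Int)) (p : List Int) (hl : p.length = 4) :
    pvCheckA adj (0 :: p) 0 = pvChain adj 0 p := by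
  match p, hl with
  | [a, b, c, d], _ =>
    rw [pvCheckA, pvCheckA, pvCheckA, pvCheckA, pvCheckA, pvCheckA]
    simp [pvChain]

-- foldl-count over lists of Int lists (same shape as pvFoldl_if_add, different element type).
theorem pvFoldl_if_add' (l : List (List Int)) (P : List Int → Prop) [DecidablePred P]
    (X : List Int → Int) (a : Int) :
    l.foldl (fun acc v => if P v then acc + X v else acc) a
      = a + (l.map (fun v => if P v then X v else 0)).sum := by
  induction l generalizing a with
  | nil => simp
  | cons x t ih => by_cases h : P x <;> simp [h, ih] <;> ring

theorem count_5cycles_eq_cnt (adj : List (List Int)) (n : Int) :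
    count_5cycles adj n = pvCnt adj 0 (pvPerms 4 (PySem.List.pyRange 1 5 1)) := by
  rw [count_5cycles,
      pvFoldl_if_add' (pvPerms 4 (PySem.List.pyRange 1 5 1))
        (fun perm => pvCheckA adj (0 :: perm) 0 = true) (fun _ => 1) 0]
  rw [pvCnt, zero_add]
  congr 1
  apply List.map_congr_left
  intro p hp
  have := pvPerms_length_mem 4 _ p hp
  rw [pvCheckA_eq_chain adj p this]

-- ===== VERDICT (by name: the statement is the Claim_ definition above) =====
theorem count_5cycles_spec : Claim_equal_count_5cycles := by
  intro adj n _ _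
  unfold Spec_count_5cycles count_5cycles_alt
  exact (count_5cycles_eq_cnt adj n).trans
    (pvDfs_eq_cnt 4 adj 0 [0] (PySem.List.pyRange 1 5 1) (by decide) (by decide) (by decide)).symm
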